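-- pv_equiv track=rewrite | github.com/ZachParsons/cmapr | src/concept_mapper/preprocessing/segment.py | _split_on_indentation
-- ===== SOURCE A (Python) =====
-- from typing import List, Tuple
--
-- def _split_on_indentation(paragraphs: List[str]) -> List[str]:
--     """
--     Further split paragraphs on indentation changes.
--
--     Detects when lines start with indentation (spaces/tabs) after
--     non-indented lines, indicating a new paragraph.
--
--     Args:
--         paragraphs: List of paragraph candidates
--
--     Returns:
--         List of refined paragraphs
--     """
--     refined = []
--
--     for para in paragraphs:
--         lines = para.split("\n")
--         if len(lines) <= 1:
--             # Single line paragraph, keep as-is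
--             refined.append(para)
--             continue
--
--         # Check for indentation pattern changes
--         current_chunk = []
--         prev_indented = False
--
--         for line in lines:
--             # Check if line starts with whitespace (excluding empty lines)
--             is_indented = bool(line) and (line[0] in " \t")
--
--             # If indentation changes, start new chunk
--             if current_chunk and is_indented and not prev_indented:
--                 # Save previous chunk
--                 refined.append("\n".join(current_chunk))
--                 current_chunk = [line]
--             else:
--                 current_chunk.append(line)
--
--             prev_indented = is_indented
--
--         # Add remaining chunk
--         if current_chunk:
--             refined.append("\n".join(current_chunk))
--
--     return refined
-- ===== SOURCE B (Python) =====
-- from typing import List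
--
--
-- def _indented(line: str) -> bool:
--     return bool(line) and line[0] in " \t"
--
--
-- def _split_para(para: str) -> List[str]:
--     lines = para.split("\n")
--     if len(lines) <= 1:
--         return [para]
--     flags = [_indented(line) for line in lines]
--     starts = [0] + [i for i in range(1, len(lines)) if flags[i] and not flags[i - 1]]
--     ends = starts[1:] + [len(lines)]
--     return ["\n".join(lines[s:e]) for s, e in zip(starts, ends)]
--
--
-- def _split_on_indentation(paragraphs: List[str]) -> List[str]:
--     return [chunk for para in paragraphs for chunk in _split_para(para)]
-- ===== Notes on version B (the rewrite author's own statement) =====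
-- stated objective: alternative
-- what changed: Replaces A's single stateful left-to-right fold (refined/current_chunk/prev_indented accumulator with flush logic) by a per-paragraph decomposition: compute the indentation flag of every line, derive the chunk-start indices (0 plus every i with flags[i] and not flags[i-1]), and slice the line list between consecutive starts.
import Mathlib
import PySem

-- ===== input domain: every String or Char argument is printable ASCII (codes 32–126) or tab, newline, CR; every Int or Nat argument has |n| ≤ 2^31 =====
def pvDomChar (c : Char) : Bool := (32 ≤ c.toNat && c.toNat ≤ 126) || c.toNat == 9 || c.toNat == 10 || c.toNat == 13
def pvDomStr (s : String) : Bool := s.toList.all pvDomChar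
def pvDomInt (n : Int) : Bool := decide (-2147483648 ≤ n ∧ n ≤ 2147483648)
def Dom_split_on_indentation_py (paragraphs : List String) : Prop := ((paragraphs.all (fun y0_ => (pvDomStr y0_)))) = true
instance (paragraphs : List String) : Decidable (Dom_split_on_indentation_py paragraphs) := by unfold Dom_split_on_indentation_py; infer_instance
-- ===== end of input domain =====

-- B re-decomposes A's stateful flush loop: per paragraph it computes indentation flags,
-- derives the chunk-start indices, and slices the line list between consecutive starts.

-- `bool(line) and line[0] in " \t"` (used verbatim by both Pythons)
def pvLineIndented (line : List Char) : Bool :=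
  match line with
  | [] => false
  | c :: _ => c == ' ' || c == '\t'

-- ===== PORT A =====
-- one step of A's inner `for line in lines` loop; state = (refined, current_chunk, prev_indented)
def pvStepA (st : List String × List (List Char) × Bool) (line : List Char) :
    List String × List (List Char) × Bool :=
  let isIndented := pvLineIndented line
  if !st.2.1.isEmpty && isIndented && !st.2.2 then
    (st.1 ++ [String.mk (PySem.Chars.join ['\n'] st.2.1)], [line], isIndented)
  else
    (st.1, st.2.1 ++ [line], isIndented)

def split_on_indentation_py (paragraphs : List String) : List String :=
  paragraphs.foldl
    (fun refined para =>
      let lines := PySem.Chars.splitOn para.toList ['\n']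
      if lines.length ≤ 1 then
        refined ++ [para]
      else
        let st := lines.foldl pvStepA (refined, [], false)
        if st.2.1 ≠ [] then st.1 ++ [String.mk (PySem.Chars.join ['\n'] st.2.1)] else st.1)
    []

-- ===== PORT B =====
-- `[i for i in range(1, len(lines)) if flags[i] and not flags[i-1]]`; indices are
-- in-range nonnegative Python ints, ported as Nat (exact here)
def pvTrans (flags : List Bool) : List Nat :=
  (List.range' 1 (flags.length - 1)).filter
    (fun i => flags.getD i false && !(flags.getD (i - 1) false))

-- `starts = [0] + [...]`
def pvStarts (flags : List Bool) : List Nat := 0 :: pvTrans flags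

-- `lines[s:e]` (exact for the nonnegative slice bounds B uses)
def pvSliceNN (lines : List (List Char)) (s e : Nat) : List (List Char) :=
  (lines.drop s).take (e - s)

-- `[lines[s:e] for s, e in zip(starts, starts[1:] + [len(lines)])]`
def pvZipChunks (lines : List (List Char)) (starts : List Nat) : List (List (List Char)) :=
  (starts.zip ((starts.drop 1) ++ [lines.length])).map (fun p => pvSliceNN lines p.1 p.2)

-- Source B `_split_para`
def pvParaChunks (para : String) : List String :=
  let lines := PySem.Chars.splitOn para.toList ['\n']
  if lines.length ≤ 1 then [para]
  else
    (pvZipChunks lines (pvStarts (lines.map pvLineIndented))).map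
      (fun g => String.mk (PySem.Chars.join ['\n'] g))

def split_on_indentation_py_alt (paragraphs : List String) : List String :=
  paragraphs.flatMap pvParaChunks

-- ===== PRECONDITION & SPEC =====
def Spec_split_on_indentation_py (paragraphs : List String) (out : List String) : Prop := out = split_on_indentation_py_alt paragraphs
instance (paragraphs : List String) (out : List String) : Decidable (Spec_split_on_indentation_py paragraphs out) := by unfold Spec_split_on_indentation_py; infer_instance

-- ===== CLAIM (what is proved, stated in full; the proofs are below) =====
def Claim_equal_split_on_indentation_py : Prop := ∀ (paragraphs : List String), Dom_split_on_indentation_py paragraphs → Spec_split_on_indentation_py paragraphs (split_on_indentation_py paragraphs)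

-- ===== LEMMAS AND PROOFS =====

-- reference grouping of a paragraph's lines: structural recursion from the front
def groupSpec : List (List Char) → List (List (List Char))
  | [] => []
  | [l] => [[l]]
  | l :: l' :: ls =>
    if pvLineIndented l' && !pvLineIndented l then
      [l] :: groupSpec (l' :: ls)
    else
      match groupSpec (l' :: ls) with
      | [] => [[l]]
      | c :: cs => (l :: c) :: cs

def mapJoin (gs : List (List (List Char))) : List String :=
  gs.map (fun g => String.mk (PySem.Chars.join ['\n'] g))

lemma groupSpec_ne_nil (l : List Char) (ls : List (List Char)) : groupSpec (l :: ls) ≠ [] := by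
  cases ls with
  | nil => simp [groupSpec]
  | cons l' ls =>
    simp only [groupSpec]
    split
    · simp
    · split <;> simp

-- A's inner loop, characterised against groupSpec
lemma afold (ls : List (List Char)) : ∀ (refined : List String) (pre : List (List Char)) (c : List Char),
    (let st := ls.foldl pvStepA (refined, pre ++ [c], pvLineIndented c)
     if st.2.1 ≠ [] then st.1 ++ [String.mk (PySem.Chars.join ['\n'] st.2.1)] else st.1)
      = refined ++ mapJoin ((pre ++ (groupSpec (c :: ls)).headI) :: (groupSpec (c :: ls)).tail) := by
  induction ls with
  | nil => intro refined pre c; simp [groupSpec, mapJoin]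
  | cons l ls ih =>
    intro refined pre c
    simp only [List.foldl_cons]
    by_cases h : (pvLineIndented l && !pvLineIndented c) = true
    · have h' : pvLineIndented l = true ∧ pvLineIndented c = false := by
        simpa using h
      have hs : pvStepA (refined, pre ++ [c], pvLineIndented c) l
          = (refined ++ [String.mk (PySem.Chars.join ['\n'] (pre ++ [c]))], [l], pvLineIndented l) := by
        simp [pvStepA, h'.1, h'.2]
      rw [hs]
      have := ih (refined ++ [String.mk (PySem.Chars.join ['\n'] (pre ++ [c]))]) [] l
      simp only [List.nil_append] at this
      rw [show ([l] : List (List Char)) = [] ++ [l] by simp] at this ⊢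
      rw [this]
      have hg : groupSpec (c :: l :: ls) = [c] :: groupSpec (l :: ls) := by
        simp [groupSpec, h]
      rw [hg]
      have hne := groupSpec_ne_nil l ls
      cases hgs : groupSpec (l :: ls) with
      | nil => exact absurd hgs hne
      | cons g gs => simp [mapJoin]
    · have h' : (pvLineIndented l && !pvLineIndented c) = false := by
        simpa using h
      have hb : ((pre ++ [c]).isEmpty) = false := by simp
      have hs : pvStepA (refined, pre ++ [c], pvLineIndented c) l
          = (refined, (pre ++ [c]) ++ [l], pvLineIndented l) := by
        simp [pvStepA, hb, h']
      rw [hs, ih refined (pre ++ [c]) l]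
      have hg : groupSpec (c :: l :: ls)
          = match groupSpec (l :: ls) with
            | [] => [[c]]
            | g :: gs => (c :: g) :: gs := by
        simp [groupSpec, h]
      have hne := groupSpec_ne_nil l ls
      cases hgs : groupSpec (l :: ls) with
      | nil => exact absurd hgs hne
      | cons g gs =>
        rw [hgs] at hg
        rw [hg]
        simp [mapJoin]

-- B-side: the transition-index list decomposes head-first
lemma range'_shift (m : Nat) : List.range' 2 m = (List.range' 1 m).map (· + 1) := by
  have := List.map_add_range' (a := 1) (s := 1) (n := m) (step := 1)
  rw [← this]; simp [Nat.add_comm]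

lemma trans_cons (l l' : List Char) (ls : List (List Char)) :
    pvTrans ((l :: l' :: ls).map pvLineIndented)
      = (if pvLineIndented l' && !pvLineIndented l then [1] else [])
        ++ (pvTrans ((l' :: ls).map pvLineIndented)).map (· + 1) := by
  simp only [pvTrans, List.map_cons, List.length_cons, List.length_map,
    Nat.add_sub_cancel]
  rw [List.range'_succ, List.filter_cons, range'_shift, List.filter_map]
  have hcong : List.filter
      ((fun i => ((pvLineIndented l :: pvLineIndented l' :: ls.map pvLineIndented).getD i false
          && !((pvLineIndented l :: pvLineIndented l' :: ls.map pvLineIndented).getD (i-1) false)))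
        ∘ (· + 1)) (List.range' 1 ls.length)
      = List.filter
        (fun i => ((pvLineIndented l' :: ls.map pvLineIndented).getD i false
          && !((pvLineIndented l' :: ls.map pvLineIndented).getD (i-1) false)))
        (List.range' 1 ls.length) := by
    apply List.filter_congr
    intro i hi
    have h1 : 1 ≤ i := (List.mem_range'_1.mp hi).1
    obtain ⟨j, rfl⟩ := Nat.exists_eq_add_of_le h1
    simp [Nat.add_comm 1 j]
  rw [hcong]
  by_cases h : (pvLineIndented l' && !pvLineIndented l) = true
  · simp [h]
  · simp only [Bool.not_eq_true] at h
    simp [h]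

-- shifting every start by one skips the first line
lemma zipChunks_shift (l : List Char) (rest : List (List Char)) (ss : List Nat) : ∀ (s : Nat),
    pvZipChunks (l :: rest) ((s :: ss).map (· + 1)) = pvZipChunks rest (s :: ss) := by
  induction ss with
  | nil => intro s; simp [pvZipChunks, pvSliceNN, Nat.succ_sub_succ]
  | cons s' ss ih =>
    intro s
    have h1 := ih s'
    simp only [pvZipChunks, List.map_cons, List.drop_one, List.tail_cons] at h1 ⊢
    simp only [List.cons_append, List.zip_cons_cons, List.map_cons]
    exact congrArg₂ _ (by simp [pvSliceNN, Nat.succ_sub_succ]) h1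

-- a start list beginning 0 with all later starts shifted: first line joins the first chunk
lemma zipChunks_cons (l : List Char) (rest : List (List Char)) (ts : List Nat) :
    pvZipChunks (l :: rest) (0 :: ts.map (· + 1))
      = (l :: (pvZipChunks rest (0 :: ts)).headI) :: (pvZipChunks rest (0 :: ts)).tail := by
  cases ts with
  | nil => simp [pvZipChunks, pvSliceNN]
  | cons t ts =>
    have hsh := zipChunks_shift l rest ts t
    simp only [List.map_cons] at hsh ⊢
    simp only [pvZipChunks, List.drop_one, List.tail_cons, List.cons_append,
      List.zip_cons_cons, List.map_cons] at hsh ⊢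
    rw [hsh]
    simp [pvSliceNN]

-- B's slice-at-starts chunking agrees with groupSpec on nonempty line lists
lemma zipChunks_eq_groupSpec (ls : List (List Char)) : ∀ (l : List Char),
    pvZipChunks (l :: ls) (pvStarts ((l :: ls).map pvLineIndented)) = groupSpec (l :: ls) := by
  induction ls with
  | nil =>
    intro l
    simp [pvStarts, pvTrans, pvZipChunks, pvSliceNN, groupSpec]
  | cons l' ls ih =>
    intro l
    rw [pvStarts, trans_cons]
    by_cases h : (pvLineIndented l' && !pvLineIndented l) = true
    · rw [if_pos h]
      have hpeel : pvZipChunks (l :: l' :: ls)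
          (0 :: 1 :: (pvTrans ((l' :: ls).map pvLineIndented)).map (· + 1))
          = pvSliceNN (l :: l' :: ls) 0 1
            :: pvZipChunks (l :: l' :: ls) ((0 :: pvTrans ((l' :: ls).map pvLineIndented)).map (· + 1)) := by
        simp [pvZipChunks]
      simp only [List.cons_append, List.nil_append] at hpeel ⊢
      rw [hpeel, zipChunks_shift l (l' :: ls) (pvTrans ((l' :: ls).map pvLineIndented)) 0]
      rw [show (0 :: pvTrans ((l' :: ls).map pvLineIndented)) = pvStarts ((l' :: ls).map pvLineIndented) from rfl]
      rw [ih l']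
      have : pvSliceNN (l :: l' :: ls) 0 1 = [l] := by simp [pvSliceNN]
      rw [this]
      simp [groupSpec, h]
    · rw [if_neg h]
      simp only [List.nil_append]
      rw [zipChunks_cons l (l' :: ls) (pvTrans ((l' :: ls).map pvLineIndented))]
      rw [show (0 :: pvTrans ((l' :: ls).map pvLineIndented)) = pvStarts ((l' :: ls).map pvLineIndented) from rfl]
      rw [ih l']
      simp only [Bool.not_eq_true] at h
      have hg : groupSpec (l :: l' :: ls)
          = match groupSpec (l' :: ls) with
            | [] => [[l]]
            | c :: cs => (l :: c) :: cs := by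
        simp [groupSpec, h]
      have hne := groupSpec_ne_nil l' ls
      cases hgs : groupSpec (l' :: ls) with
      | nil => exact absurd hgs hne
      | cons g gs =>
        rw [hgs] at hg
        rw [hg]
        simp

-- A's outer body equals refined ++ pvParaChunks para
lemma para_A (refined : List String) (para : String) :
    (let lines := PySem.Chars.splitOn para.toList ['\n']
     if lines.length ≤ 1 then
       refined ++ [para]
     else
       let st := lines.foldl pvStepA (refined, [], false)
       if st.2.1 ≠ [] then st.1 ++ [String.mk (PySem.Chars.join ['\n'] st.2.1)] else st.1)
      = refined ++ pvParaChunks para := by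
  simp only [pvParaChunks]
  by_cases hlen : (PySem.Chars.splitOn para.toList ['\n']).length ≤ 1
  · simp [hlen]
  · simp only [hlen, if_false]
    cases hls : PySem.Chars.splitOn para.toList ['\n'] with
    | nil => rw [hls] at hlen; simp at hlen
    | cons l0 rest =>
      cases rest with
      | nil => rw [hls] at hlen; simp at hlen
      | cons l1 ls =>
        have h0 : pvStepA (refined, [], false) l0 = (refined, [] ++ [l0], pvLineIndented l0) := by
          simp [pvStepA]
        simp only [List.foldl_cons, h0]
        have ha := afold (l1 :: ls) refined [] l0
        simp only [List.foldl_cons] at ha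
        rw [ha]
        have hne := groupSpec_ne_nil l0 (l1 :: ls)
        have hpg := zipChunks_eq_groupSpec (l1 :: ls) l0
        cases hgs : groupSpec (l0 :: l1 :: ls) with
        | nil => exact absurd hgs hne
        | cons g gs =>
          rw [hgs] at hpg
          rw [hpg]
          simp [mapJoin]

-- A's outer fold, characterised against B's flatMap
lemma outer (ps : List String) : ∀ (init : List String),
    ps.foldl
      (fun refined para =>
        let lines := PySem.Chars.splitOn para.toList ['\n']
        if lines.length ≤ 1 then
          refined ++ [para]
        else
          let st := lines.foldl pvStepA (refined, [], false)
          if st.2.1 ≠ [] then st.1 ++ [String.mk (PySem.Chars.join ['\n'] st.2.1)] else st.1)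
      init
      = init ++ ps.flatMap pvParaChunks := by
  induction ps with
  | nil => simp
  | cons p ps ih =>
    intro init
    rw [List.foldl_cons]
    show ps.foldl _ (let lines := PySem.Chars.splitOn p.toList ['\n']
        if lines.length ≤ 1 then init ++ [p]
        else
          let st := lines.foldl pvStepA (init, [], false)
          if st.2.1 ≠ [] then st.1 ++ [String.mk (PySem.Chars.join ['\n'] st.2.1)] else st.1) = _
    rw [para_A init p, ih]
    simp

-- ===== VERDICT (by name: the statement is the Claim_ definition above) =====
theorem split_on_indentation_py_spec : Claim_equal_split_on_indentation_py := by
  intro paragraphs _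
  unfold Spec_split_on_indentation_py split_on_indentation_py split_on_indentation_py_alt
  rw [outer paragraphs []]
  simp
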